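-- pv_equiv track=rewrite | github.com/Scorpi000/QuantStudio | Tools/DateTimeFun.py | getYearLastDay
-- ===== SOURCE A (Python) =====
-- def getYearLastDay(dates):
--     dates.sort()
--     YearLastDay = []
--     YearLastDay.append(dates[0])
--     for iDate in dates:
--         if (iDate[:4]==YearLastDay[-1][:4]):
--             YearLastDay[-1] = iDate
--         else:
--             YearLastDay.append(iDate)
--     return YearLastDay
-- ===== SOURCE B (Python) =====
-- def getYearLastDay(dates):
--     groups = {}
--     for d in dates:
--         groups.setdefault(d[:4], []).append(d)
--     return [max(groups[y]) for y in sorted(groups)]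
-- ===== Notes on version B (the rewrite author's own statement) =====
-- stated objective: alternative
-- what changed: B never sorts the date list: it buckets the dates by year prefix d[:4] into a dict of lists, then returns max() of each bucket over the sorted year keys, replacing A's full sort followed by a linear scan with a last-entry accumulator (B also does not mutate the argument).
-- outside the precondition, e.g. on getYearLastDay([]): A raises IndexError, B returns []
import Mathlib
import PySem

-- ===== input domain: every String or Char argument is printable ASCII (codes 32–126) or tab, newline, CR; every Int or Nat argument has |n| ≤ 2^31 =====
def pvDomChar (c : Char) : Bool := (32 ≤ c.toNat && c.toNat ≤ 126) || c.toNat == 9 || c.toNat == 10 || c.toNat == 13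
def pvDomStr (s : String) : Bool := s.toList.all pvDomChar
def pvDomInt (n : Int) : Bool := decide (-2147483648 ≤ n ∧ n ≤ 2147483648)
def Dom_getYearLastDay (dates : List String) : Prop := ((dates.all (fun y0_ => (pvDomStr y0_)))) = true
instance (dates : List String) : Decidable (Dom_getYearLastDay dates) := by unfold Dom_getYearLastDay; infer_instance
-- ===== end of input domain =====

-- B never sorts the date list: it buckets dates by year prefix and takes max() per bucket;
-- equivalence is about the RETURN value — A sorts its argument in place, B leaves it unchanged.

-- the year prefix d[:4], used by both ports
def pvPref (s : String) : String := PySem.Str.slice s none (some 4)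

-- A's loop body: compare iDate[:4] with YearLastDay[-1][:4], replace the last entry or append
def pvStepA (acc : List String) (iDate : String) : List String :=
  match PySem.List.pyGet? acc (-1) with
  | none => acc          -- unreachable: acc starts nonempty and never shrinks
  | some last =>
    if pvPref iDate = pvPref last then acc.dropLast ++ [iDate]   -- YearLastDay[-1] = iDate
    else acc ++ [iDate]                                          -- YearLastDay.append(iDate)

-- ===== PORT A =====
def getYearLastDay (dates : List String) : List String :=
  let s := PySem.List.sorted dates (fun x => x) false
  match PySem.List.pyGet? s 0 with
  | none => []           -- unreachable under Pre_: dates[0] raises IndexError on []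
  | some d0 => s.foldl pvStepA [d0]

-- B's loop body: groups.setdefault(d[:4], []).append(d), i.e. groups[k] = groups.get(k, []) + [d]
def pvStepB (g : PySem.Dict String (List String)) (d : String) : PySem.Dict String (List String) :=
  g.modify (pvPref d) [] (fun l => l ++ [d])

-- ===== PORT B =====
-- groups[y] is getD y [] (KeyError impossible: y comes from groups' keys); the max default ""
-- is unreachable, every group being nonempty
def getYearLastDay_alt (dates : List String) : List String :=
  let groups := dates.foldl pvStepB PySem.Dict.empty
  (PySem.List.sorted groups.keys (fun x => x) false).map
    (fun y => (PySem.List.max? (groups.getD y []) (fun x => x)).getD "")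

-- ===== PRECONDITION & SPEC =====
-- Pre_ excludes only the empty list, on which A raises IndexError (dates[0]).
def Pre_getYearLastDay (dates : List String) : Prop := dates ≠ []
instance (dates : List String) : Decidable (Pre_getYearLastDay dates) := by unfold Pre_getYearLastDay; infer_instance
def pvWitness_getYearLastDay : List String := ["20200101", "20201231", "20190505"]

def Spec_getYearLastDay (dates : List String) (out : List String) : Prop := out = getYearLastDay_alt dates
instance (dates : List String) (out : List String) : Decidable (Spec_getYearLastDay dates out) := by unfold Spec_getYearLastDay; infer_instance

-- ===== CLAIM (what is proved, stated in full; the proofs are below) =====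
def Claim_equal_getYearLastDay : Prop := ∀ (dates : List String), Dom_getYearLastDay dates → Pre_getYearLastDay dates → Spec_getYearLastDay dates (getYearLastDay dates)

-- ===== LEMMAS AND PROOFS =====

-- proof-side abbreviation: the max over one year's dates in the whole input
def pvYearMax (dates : List String) (y : String) : String :=
  (PySem.List.max? (dates.filter (fun d => pvPref d = y)) (fun x => x)).getD ""

-- A's accumulator shape: what one fold over the rest of the input produces, group-maxima style
def pvGmax (last : String) : List String → List String
  | [] => [last]
  | d :: t => if pvPref d = pvPref last then pvGmax d t else last :: pvGmax d t

-- lexicographic comparison survives taking a prefix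
theorem pvTake_lex (n : Nat) (s t : List Char) (h : List.Lex (· < ·) s t) :
    List.Lex (· < ·) (s.take n) (t.take n) ∨ s.take n = t.take n := by
  induction h generalizing n with
  | nil =>
    cases n with
    | zero => exact Or.inr rfl
    | succ m => exact Or.inl List.Lex.nil
  | @cons a s' t' h ih =>
    cases n with
    | zero => exact Or.inr rfl
    | succ m =>
      rcases ih m with h1 | h1
      · exact Or.inl (List.Lex.cons h1)
      · exact Or.inr (by simp [h1])
  | rel h =>
    cases n with
    | zero => exact Or.inr rfl
    | succ m => exact Or.inl (List.Lex.rel h)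

theorem pvPref_toList (s : String) : (pvPref s).toList = s.toList.take 4 := by
  simp [pvPref, PySem.Str.slice, PySem.List.slice_to]

theorem pvPref_mono (s t : String) (h : s ≤ t) : pvPref s ≤ pvPref t := by
  rcases eq_or_lt_of_le h with rfl | hlt
  · exact le_refl _
  · have hlex : List.Lex (· < ·) s.toList t.toList := String.lt_iff_toList_lt.mp hlt
    rcases pvTake_lex 4 s.toList t.toList hlex with h1 | h1
    · refine le_of_lt ?_
      rw [String.lt_iff_toList_lt, pvPref_toList, pvPref_toList]
      exact h1
    · refine le_of_eq ?_
      rw [← String.toList_inj, pvPref_toList, pvPref_toList]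
      exact h1

-- one step of A on an accumulator written as L ++ [last]
theorem pvStepA_eq (L : List String) (last d : String) :
    pvStepA (L ++ [last]) d =
      if pvPref d = pvPref last then L ++ [d] else (L ++ [last]) ++ [d] := by
  rw [pvStepA, PySem.List.pyGet?_neg_one, List.getLast?_concat]
  rw [List.dropLast_concat]

-- A's whole fold is pvGmax of the remaining input
theorem pvFoldA (t : List String) : ∀ (L : List String) (last : String),
    t.foldl pvStepA (L ++ [last]) = L ++ pvGmax last t := by
  induction t with
  | nil => intro L last; simp [pvGmax]
  | cons d t' ih =>
    intro L last
    rw [List.foldl_cons, pvStepA_eq, pvGmax]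
    by_cases hp : pvPref d = pvPref last
    · rw [if_pos hp, if_pos hp, ih]
    · rw [if_neg hp, if_neg hp, ih (L ++ [last]) d, List.append_assoc]
      rfl

-- sorted(set(xs)) depends only on the members of xs
theorem pvSortedSet (xs ys : List String) (h : ∀ x, x ∈ xs ↔ x ∈ ys) :
    PySem.List.sorted (PySem.Set.ofList xs) (fun x => x) false =
      PySem.List.sorted (PySem.Set.ofList ys) (fun x => x) false := by
  apply PySem.List.sorted_eq_of_perm_of_pairwise_lt
  · refine (PySem.List.sorted_perm _ _ _).trans ?_
    rw [List.perm_ext_iff_of_nodup (PySem.Set.nodup_ofList _) (PySem.Set.nodup_ofList _)]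
    intro a
    rw [PySem.Set.mem_ofList, PySem.Set.mem_ofList]
    exact (h a).symm
  · exact PySem.List.sorted_ofList_pairwise_lt _

-- the value of max(...) is permutation-invariant
theorem pvMax_perm (l l' : List String) (h : l.Perm l') :
    PySem.List.max? l (fun x => x) = PySem.List.max? l' (fun x => x) := by
  cases h1 : PySem.List.max? l (fun x => x) with
  | none =>
    rw [PySem.List.max?_eq_none_iff] at h1
    subst h1
    rw [eq_comm, PySem.List.max?_eq_none_iff]
    exact h.nil_eq.symm
  | some m =>
    cases h2 : PySem.List.max? l' (fun x => x) with
    | none =>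
      rw [PySem.List.max?_eq_none_iff] at h2
      subst h2
      rw [List.Perm.eq_nil h] at h1
      simp [PySem.List.max?] at h1
    | some m' =>
      have hm : m ∈ l' := h.mem_iff.mp (PySem.List.max?_mem h1)
      have hm' : m' ∈ l := h.mem_iff.mpr (PySem.List.max?_mem h2)
      have h3 : m ≤ m' := PySem.List.max?_isMax h2 m hm
      have h4 : m' ≤ m := PySem.List.max?_isMax h1 m' hm'
      rw [le_antisymm h3 h4]

-- prepending a date of an already-present year does not change any year's max
theorem pvYearMax_cons_dup (last d : String) (t' : List String)
    (hp : pvPref d = pvPref last) (hld : last ≤ d) (y : String) :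
    pvYearMax (last :: d :: t') y = pvYearMax (d :: t') y := by
  unfold pvYearMax
  by_cases hy : pvPref last = y
  · have hdy : pvPref d = y := hp.trans hy
    have h1 : List.filter (fun d => decide (pvPref d = y)) (last :: d :: t')
        = last :: d :: List.filter (fun d => decide (pvPref d = y)) t' := by
      simp [hy, hdy]
    have h2 : List.filter (fun d => decide (pvPref d = y)) (d :: t')
        = d :: List.filter (fun d => decide (pvPref d = y)) t' := by
      simp [hdy]
    rw [h1, h2, PySem.List.max?_id_cons, PySem.List.max?_id_cons, List.foldl_cons,
      max_eq_right hld]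
  · rw [List.filter_cons_of_neg (by simpa using hy)]

-- a date whose year occurs nowhere in l does not change any OTHER year's max
theorem pvYearMax_cons_ne (x : String) (l : List String) (y : String) (hy : pvPref x ≠ y) :
    pvYearMax (x :: l) y = pvYearMax l y := by
  unfold pvYearMax
  rw [List.filter_cons_of_neg (by simpa using hy)]

-- the core: on a sorted list, A's group-maxima fold equals B's per-year-max picture
theorem pvGM (t : List String) : ∀ (last : String), (last :: t).Pairwise (· ≤ ·) →
    pvGmax last t =
      (PySem.List.sorted (PySem.Set.ofList ((last :: t).map pvPref)) (fun x => x) false).map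
        (pvYearMax (last :: t)) := by
  induction t with
  | nil =>
    intro last _
    have hs : PySem.Set.ofList [pvPref last] = [pvPref last] := rfl
    have hsort : PySem.List.sorted [pvPref last] (fun x => x) false = [pvPref last] :=
      PySem.List.sorted_eq_self_of_pairwise [pvPref last] (fun x => x) (by simp)
    rw [pvGmax, List.map_cons, List.map_nil, hs, hsort]
    unfold pvYearMax
    rw [List.map_cons, List.map_nil, List.filter_cons_of_pos (by simp), List.filter_nil,
      PySem.List.max?_id_cons]
    rfl
  | cons d t' ih =>
    intro last h
    have hld : last ≤ d := (List.pairwise_cons.mp h).1 d (List.mem_cons_self ..)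
    have htail : (d :: t').Pairwise (· ≤ ·) := h.of_cons
    by_cases hp : pvPref d = pvPref last
    · rw [pvGmax, if_pos hp, ih d htail]
      have hyears : PySem.List.sorted (PySem.Set.ofList ((d :: t').map pvPref)) (fun x => x) false
          = PySem.List.sorted (PySem.Set.ofList ((last :: d :: t').map pvPref)) (fun x => x) false := by
        apply pvSortedSet
        intro x
        simp only [List.map_cons, List.mem_cons]
        constructor
        · intro hx; tauto
        · rintro (hx | hx) <;> [skip; tauto]
          rw [hx, ← hp]; tauto
      rw [hyears]
      exact (List.map_congr_left (fun y _ => pvYearMax_cons_dup last d t' hp hld y)).symm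
    · -- new, strictly smaller year in front
      have hlt : ∀ x ∈ d :: t', pvPref last < pvPref x := by
        intro x hx
        have hle : last ≤ x := (List.pairwise_cons.mp h).1 x hx
        have h1 : pvPref last ≤ pvPref x := pvPref_mono _ _ hle
        rcases List.mem_cons.mp hx with rfl | hx'
        · exact lt_of_le_of_ne h1 (fun he => hp he.symm)
        · have hdx : d ≤ x := (List.pairwise_cons.mp htail).1 x hx'
          refine lt_of_le_of_ne h1 (fun he => hp ?_)
          exact le_antisymm (he ▸ pvPref_mono _ _ hdx) (pvPref_mono _ _ hld)
      have hyears : PySem.List.sorted (PySem.Set.ofList ((last :: d :: t').map pvPref)) (fun x => x) false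
          = pvPref last :: PySem.List.sorted (PySem.Set.ofList ((d :: t').map pvPref)) (fun x => x) false := by
        apply PySem.List.sorted_eq_of_perm_of_pairwise_lt
        · have hmem : ∀ x, x ∈ PySem.List.sorted (PySem.Set.ofList ((d :: t').map pvPref)) (fun x => x) false
              ↔ x ∈ (d :: t').map pvPref := by
            intro x
            rw [PySem.List.mem_sorted, PySem.Set.mem_ofList]
          have hnotin : pvPref last ∉ PySem.List.sorted (PySem.Set.ofList ((d :: t').map pvPref)) (fun x => x) false := by
            rw [hmem]
            intro hmem'
            rcases List.mem_map.mp hmem' with ⟨x, hx, hxe⟩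
            exact absurd hxe.symm (ne_of_lt (hlt x hx))
          rw [List.perm_ext_iff_of_nodup
            (List.Nodup.cons hnotin (((PySem.List.sorted_perm _ _ _).nodup_iff).mpr (PySem.Set.nodup_ofList _)))
            (PySem.Set.nodup_ofList _)]
          intro a
          rw [PySem.Set.mem_ofList, List.mem_cons, hmem]
          simp only [List.map_cons, List.mem_cons]
        · rw [List.pairwise_cons]
          refine ⟨?_, PySem.List.sorted_ofList_pairwise_lt _⟩
          intro y hy
          rw [PySem.List.mem_sorted, PySem.Set.mem_ofList] at hy
          rcases List.mem_map.mp hy with ⟨x, hx, rfl⟩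
          exact hlt x hx
      rw [pvGmax, if_neg hp, hyears, List.map_cons]
      congr 1
      · -- the head: the new year's group is exactly [last]
        unfold pvYearMax
        rw [List.filter_cons_of_pos (by simp)]
        have hrest : (d :: t').filter (fun x => decide (pvPref x = pvPref last)) = [] := by
          rw [List.filter_eq_nil_iff]
          intro x hx
          simpa using ne_of_gt (hlt x hx)
        rw [hrest, PySem.List.max?_id_cons]
        rfl
      · -- the tail: drop last from every other year's group, then the IH
        rw [ih d htail]
        refine List.map_congr_left (fun y hy => ?_)
        rw [PySem.List.mem_sorted, PySem.Set.mem_ofList] at hy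
        rcases List.mem_map.mp hy with ⟨x, hx, rfl⟩
        exact (pvYearMax_cons_ne last (d :: t') (pvPref x) (ne_of_lt (hlt x hx))).symm

-- B's grouping dict, read back: each year's bucket is that year's dates in input order
theorem pvGroupsGetD (dates : List String) (g : PySem.Dict String (List String)) (y : String) :
    (dates.foldl pvStepB g).getD y []
      = g.getD y [] ++ dates.filter (fun d => decide (pvPref d = y)) := by
  induction dates generalizing g with
  | nil => simp
  | cons d t ih =>
    rw [List.foldl_cons, ih]
    by_cases hy : pvPref d = y
    · rw [List.filter_cons_of_pos (by simpa using hy)]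
      have hstep : (pvStepB g d).getD y [] = g.getD y [] ++ [d] := by
        rw [pvStepB, hy, PySem.Dict.getD_modify_self]
      rw [hstep, List.append_assoc]
      rfl
    · rw [List.filter_cons_of_neg (by simpa using hy)]
      congr 1
      rw [pvStepB, PySem.Dict.getD_modify, if_neg (fun h => hy h.symm)]

-- B's grouping dict has exactly the year prefixes as keys, in first-occurrence order
theorem pvGroupsKeys (dates : List String) :
    (dates.foldl pvStepB PySem.Dict.empty).keys = PySem.Set.ofList (dates.map pvPref) := by
  have h := PySem.Dict.keys_foldl_modify_key dates pvPref ([] : List String)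
    (fun _ d => fun l => l ++ [d]) PySem.Dict.empty
  exact h

-- B's port, rewritten through the two dict lemmas into the per-year-max picture
theorem pvAltEq (dates : List String) :
    getYearLastDay_alt dates
      = (PySem.List.sorted (PySem.Set.ofList (dates.map pvPref)) (fun x => x) false).map
          (pvYearMax dates) := by
  show (PySem.List.sorted (dates.foldl pvStepB PySem.Dict.empty).keys (fun x => x) false).map
      (fun y => (PySem.List.max? ((dates.foldl pvStepB PySem.Dict.empty).getD y [])
        (fun x => x)).getD "") = _
  rw [pvGroupsKeys]
  refine List.map_congr_left (fun y _ => ?_)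
  unfold pvYearMax
  rw [pvGroupsGetD, PySem.Dict.getD_empty, List.nil_append]

-- ===== VERDICT (by name: the statement is the Claim_ definition above) =====
theorem getYearLastDay_spec : Claim_equal_getYearLastDay := by
  intro dates _ hpre
  unfold Spec_getYearLastDay getYearLastDay
  rw [pvAltEq]
  have hs : PySem.List.sorted dates (fun x => x) false ≠ [] := by
    rw [Ne, PySem.List.sorted_eq_nil_iff]; exact hpre
  obtain ⟨d0, t, hst⟩ := List.exists_cons_of_ne_nil hs
  have hperm : (PySem.List.sorted dates (fun x => x) false).Perm dates :=
    PySem.List.sorted_perm _ _ _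
  have hpw : (PySem.List.sorted dates (fun x => x) false).Pairwise (· ≤ ·) := by
    simpa using PySem.List.sorted_pairwise dates (fun x => x)
  rw [hst] at hperm hpw
  simp only [hst, PySem.List.pyGet?_zero_cons, List.foldl_cons]
  have h1 : pvStepA [d0] d0 = [d0] := by
    rw [pvStepA, PySem.List.pyGet?_neg_one]
    simp
  rw [h1]
  have h2 : ([] : List String) ++ [d0] = [d0] := rfl
  rw [← h2, pvFoldA t [] d0, List.nil_append, pvGM t d0 hpw]
  -- transport from the sorted list back to the original argument
  have hyears : PySem.List.sorted (PySem.Set.ofList ((d0 :: t).map pvPref)) (fun x => x) false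
      = PySem.List.sorted (PySem.Set.ofList (dates.map pvPref)) (fun x => x) false := by
    apply pvSortedSet
    intro x
    exact (hperm.map pvPref).mem_iff
  rw [hyears]
  refine List.map_congr_left (fun y _ => ?_)
  unfold pvYearMax
  rw [pvMax_perm _ _ (hperm.filter _)]
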